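-- pv_equiv track=rewrite | github.com/juSt6790/Agentic-Chatbot | agent_backend/services/notion_mcp.py | find_people_property_name
-- ===== SOURCE A (Python) =====
-- from typing import List, Dict, Any, Optional
--
-- def find_people_property_name(properties: Dict[str, Any]) -> str | None:
--     """
--     Find the most appropriate people property in a database schema.
--     Prefer properties whose type is 'people' and whose name suggests assignee/owner.
--     """
--     # First pass: semantic match on common assignee/owner labels
--     preferred_keywords = ["assignee", "owner", "responsible", "assigned"]
--     for prop_name, prop_info in properties.items():
--         if prop_info.get("type") == "people":
--             lower = prop_name.lower()
--             if any(keyword in lower for keyword in preferred_keywords):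
--                 return prop_name
--
--     # Fallback: first people-type property
--     for prop_name, prop_info in properties.items():
--         if prop_info.get("type") == "people":
--             return prop_name
--     return None
-- ===== SOURCE B (Python) =====
-- def find_people_property_name(properties):
--     """Single pass: return the first people property with a preferred keyword
--     immediately; remember the first people property as fallback."""
--     preferred_keywords = ["assignee", "owner", "responsible", "assigned"]
--     fallback = None
--     for prop_name, prop_info in properties.items():
--         if prop_info.get("type") == "people":
--             lower = prop_name.lower()
--             if any(keyword in lower for keyword in preferred_keywords):
--                 return prop_name
--             if fallback is None:
--                 fallback = prop_name
--     return fallback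
-- ===== Notes on version B (the rewrite author's own statement) =====
-- stated objective: simpler
-- what changed: Replaces A's two sequential scans of the properties with a single pass that returns a keyword-matching people property immediately and otherwise remembers the first people property as a fallback.
import Mathlib
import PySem

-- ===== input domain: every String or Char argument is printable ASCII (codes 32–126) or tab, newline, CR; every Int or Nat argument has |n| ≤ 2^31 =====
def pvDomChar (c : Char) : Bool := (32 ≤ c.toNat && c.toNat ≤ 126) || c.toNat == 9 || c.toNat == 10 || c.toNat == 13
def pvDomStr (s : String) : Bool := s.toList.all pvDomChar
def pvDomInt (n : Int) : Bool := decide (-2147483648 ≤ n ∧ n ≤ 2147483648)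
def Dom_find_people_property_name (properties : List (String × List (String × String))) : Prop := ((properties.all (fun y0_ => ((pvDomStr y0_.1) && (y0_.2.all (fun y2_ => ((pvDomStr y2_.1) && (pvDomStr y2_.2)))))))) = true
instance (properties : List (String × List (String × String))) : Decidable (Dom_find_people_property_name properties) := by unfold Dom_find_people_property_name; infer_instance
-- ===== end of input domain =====

-- B replaces A's two sequential scans with one pass carrying a fallback; objective: simpler.

-- ===== PORT A =====
-- prop_info.get("type") == "people"
def fpIsPeople (info : List (String × String)) : Bool :=
  (PySem.Dict.get? (PySem.Dict.mk info) "type") == some "people"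

def fpKeywords : List String := ["assignee", "owner", "responsible", "assigned"]

-- any(keyword in lower for keyword in preferred_keywords)
def fpHasKeyword (name : String) : Bool :=
  fpKeywords.any (fun k => PySem.Str.isIn k (PySem.Str.lower name))

-- first for-loop of A: semantic match
def fpFirstPass : List (String × List (String × String)) → Option String
  | [] => none
  | (n, i) :: rest =>
    if fpIsPeople i then
      (if fpHasKeyword n then some n else fpFirstPass rest)
    else fpFirstPass rest

-- second for-loop of A: first people-type property
def fpSecondPass : List (String × List (String × String)) → Option String
  | [] => none
  | (n, i) :: rest => if fpIsPeople i then some n else fpSecondPass rest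

def find_people_property_name (properties : List (String × List (String × String))) : Option String :=
  match fpFirstPass properties with
  | some n => some n
  | none => fpSecondPass properties

-- ===== PORT B =====
-- single loop of B with the fallback accumulator
def fpGo : List (String × List (String × String)) → Option String → Option String
  | [], fb => fb
  | (n, i) :: rest, fb =>
    if fpIsPeople i then
      (if fpHasKeyword n then some n
       else fpGo rest (if fb.isNone then some n else fb))
    else fpGo rest fb

def find_people_property_name_alt (properties : List (String × List (String × String))) : Option String :=
  fpGo properties none

-- ===== PRECONDITION & SPEC =====
def Spec_find_people_property_name (properties : List (String × List (String × String))) (out : Option String) : Prop := out = find_people_property_name_alt properties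
instance (properties : List (String × List (String × String))) (out : Option String) : Decidable (Spec_find_people_property_name properties out) := by unfold Spec_find_people_property_name; infer_instance

-- ===== CLAIM (what is proved, stated in full; the proofs are below) =====
def Claim_equal_find_people_property_name : Prop := ∀ (properties : List (String × List (String × String))), Dom_find_people_property_name properties → Spec_find_people_property_name properties (find_people_property_name properties)

-- ===== LEMMAS AND PROOFS =====
theorem fpGo_eq (ps : List (String × List (String × String))) :
    ∀ fb : Option String,
      fpGo ps fb =
        match fpFirstPass ps with
        | some x => some x
        | none => match fb with
                  | some y => some y
                  | none => fpSecondPass ps := by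
  induction ps with
  | nil => intro fb; cases fb <;> simp [fpGo, fpFirstPass, fpSecondPass]
  | cons hd rest ih =>
    intro fb
    obtain ⟨n, i⟩ := hd
    by_cases hp : fpIsPeople i = true
    · by_cases hk : fpHasKeyword n = true
      · simp [fpGo, fpFirstPass, hp, hk]
      · cases fb <;>
          simp [fpGo, fpFirstPass, fpSecondPass, hp, hk, ih]
    · simp only [Bool.not_eq_true] at hp
      simp [fpGo, fpFirstPass, fpSecondPass, hp, ih]

-- ===== VERDICT (by name: the statement is the Claim_ definition above) =====
theorem find_people_property_name_spec : Claim_equal_find_people_property_name := by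
  intro ps _
  unfold Spec_find_people_property_name find_people_property_name find_people_property_name_alt
  rw [fpGo_eq]
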